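-- pv_equiv track=rewrite | github.com/pmelamed/aoc_python | day25_09.py | make_sparce_axis
-- ===== SOURCE A (Python) =====
-- from typing import Iterable
--
-- def make_sparce_axis( in_coords: Iterable[ int ] ) -> list[ tuple[ int, int ] ]:
--     coords = list( set( in_coords ) )
--     coords.sort()
--     lo: list[ int ] = [ ]
--     hi: list[ int ] = [ ]
--     lo.append( coords[ 0 ] - 1 )
--     hi.append( coords[ 0 ] - 1 )
--     for index in range( len( coords ) - 1 ):
--         lo.append( coords[ index ] )
--         hi.append( coords[ index ] )
--         if coords[ index + 1 ] - coords[ index ] > 1: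
--             lo.append( coords[ index ] + 1 )
--             hi.append( coords[ index + 1 ] - 1 )
--     lo.append( coords[ -1 ] )
--     hi.append( coords[ -1 ] )
--     lo.append( coords[ -1 ] + 1 )
--     hi.append( coords[ -1 ] + 1 )
--     return list( zip( lo, hi ) )
-- ===== SOURCE B (Python) =====
-- def make_sparce_axis(in_coords):
--     cs = sorted(set(in_coords))
--     pieces = [(c, c) for c in cs]
--     pieces += [(a + 1, b - 1) for a, b in zip(cs, cs[1:]) if b - a > 1]
--     pieces += [(cs[0] - 1, cs[0] - 1), (cs[-1] + 1, cs[-1] + 1)]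
--     return sorted(pieces, key=lambda p: p[0])
-- ===== Notes on version B (the rewrite author's own statement) =====
-- stated objective: alternative
-- what changed: Instead of A's single index loop appending into two parallel lo/hi lists zipped at the end, B builds the singleton intervals, the gap intervals and the two sentinel points as three independent comprehensions and sorts the concatenation by interval start (the starts are pairwise distinct, so this yields exactly A's order).
import Mathlib
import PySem

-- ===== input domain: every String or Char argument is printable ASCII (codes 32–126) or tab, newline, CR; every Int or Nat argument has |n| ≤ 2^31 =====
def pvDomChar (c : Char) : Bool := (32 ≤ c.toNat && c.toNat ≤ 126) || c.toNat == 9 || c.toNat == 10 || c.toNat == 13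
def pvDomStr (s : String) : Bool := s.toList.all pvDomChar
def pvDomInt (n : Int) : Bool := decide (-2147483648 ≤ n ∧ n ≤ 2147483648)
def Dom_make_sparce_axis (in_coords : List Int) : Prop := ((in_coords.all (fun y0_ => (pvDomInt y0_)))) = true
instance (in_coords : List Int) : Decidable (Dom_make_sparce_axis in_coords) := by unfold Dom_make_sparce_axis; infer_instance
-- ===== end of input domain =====

-- B builds the singleton intervals, gap intervals and sentinel points as three independent
-- comprehensions and sorts the concatenation by interval start, instead of A's index loop
-- filling two parallel lo/hi lists zipped at the end (objective: alternative; same cost).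

-- ===== PORT A =====
-- literal transliteration: coords = sorted(set(in_coords)); lo/hi built by appends in an
-- index loop over range(len(coords)-1); zip(lo, hi) at the end.
def make_sparce_axis (in_coords : List Int) : List (Int × Int) :=
  let coords := PySem.List.sorted (PySem.Set.ofList in_coords) (fun x => x) false
  let lo : List Int := []
  let hi : List Int := []
  let lo := lo ++ [PySem.List.pyGetD coords 0 0 - 1]   -- coords[0] raises on empty input; Pre_ excludes it
  let hi := hi ++ [PySem.List.pyGetD coords 0 0 - 1]
  let s := (PySem.List.pyRange 0 ((coords.length : Int) - 1) 1).foldl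
    (fun (s : List Int × List Int) index =>
      let lo := s.1 ++ [PySem.List.pyGetD coords index 0]
      let hi := s.2 ++ [PySem.List.pyGetD coords index 0]
      if PySem.List.pyGetD coords (index + 1) 0 - PySem.List.pyGetD coords index 0 > 1 then
        (lo ++ [PySem.List.pyGetD coords index 0 + 1],
         hi ++ [PySem.List.pyGetD coords (index + 1) 0 - 1])
      else (lo, hi)) (lo, hi)
  let lo := s.1 ++ [PySem.List.pyGetD coords (-1) 0]
  let hi := s.2 ++ [PySem.List.pyGetD coords (-1) 0]
  let lo := lo ++ [PySem.List.pyGetD coords (-1) 0 + 1]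
  let hi := hi ++ [PySem.List.pyGetD coords (-1) 0 + 1]
  lo.zip hi

-- ===== PORT B =====
-- literal transliteration of Source B: singles, gap comprehension over zip(cs, cs[1:]),
-- the two sentinel pairs, then sorted(pieces, key=lambda p: p[0]).
def make_sparce_axis_alt (in_coords : List Int) : List (Int × Int) :=
  let cs := PySem.List.sorted (PySem.Set.ofList in_coords) (fun x => x) false
  let pieces := cs.map (fun c => (c, c))
  let pieces := pieces ++
    (((cs.zip (PySem.List.slice cs (some 1) none)).filter
        (fun p => p.2 - p.1 > 1)).map (fun p => (p.1 + 1, p.2 - 1)))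
  let pieces := pieces ++
    [(PySem.List.pyGetD cs 0 0 - 1, PySem.List.pyGetD cs 0 0 - 1),
     (PySem.List.pyGetD cs (-1) 0 + 1, PySem.List.pyGetD cs (-1) 0 + 1)]
  PySem.List.sorted pieces (fun p => p.1) false

-- ===== PRECONDITION & SPEC =====
-- A raises IndexError (coords[0]) exactly on the empty input; Pre_ excludes only that.
def Pre_make_sparce_axis (in_coords : List Int) : Prop := in_coords ≠ []
instance (in_coords : List Int) : Decidable (Pre_make_sparce_axis in_coords) := by
  unfold Pre_make_sparce_axis; infer_instance
def pvWitness_make_sparce_axis : List Int := ([3, 1, 1, 7])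

def Spec_make_sparce_axis (in_coords : List Int) (out : List (Int × Int)) : Prop := out = make_sparce_axis_alt in_coords
instance (in_coords : List Int) (out : List (Int × Int)) : Decidable (Spec_make_sparce_axis in_coords out) := by unfold Spec_make_sparce_axis; infer_instance

-- ===== CLAIM (what is proved, stated in full; the proofs are below) =====
def Claim_equal_make_sparce_axis : Prop := ∀ (in_coords : List Int), Dom_make_sparce_axis in_coords → Pre_make_sparce_axis in_coords → Spec_make_sparce_axis in_coords (make_sparce_axis in_coords)

-- ===== LEMMAS AND PROOFS =====

-- proof-side recursion producing A's pair sequence directly (used to characterise BOTH ports)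
def msaGo (c : Int) (rest : List Int) : List (Int × Int) :=
  match rest with
  | [] => [(c, c), (c + 1, c + 1)]
  | n :: rest' =>
    (if n - c > 1 then [(c, c), (c + 1, n - 1)] else [(c, c)]) ++ msaGo n rest'

-- the pairs emitted per adjacent coordinate pair (a, b)
def msaEmit (p : Int × Int) : List (Int × Int) :=
  (p.1, p.1) :: (if p.2 - p.1 > 1 then [(p.1 + 1, p.2 - 1)] else [])

-- A's loop step, rephrased on the adjacent pair it reads
def msaStep (s : List Int × List Int) (p : Int × Int) : List Int × List Int :=
  let lo := s.1 ++ [p.1]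
  let hi := s.2 ++ [p.1]
  if p.2 - p.1 > 1 then (lo ++ [p.1 + 1], hi ++ [p.2 - 1]) else (lo, hi)

-- fold over range(len-1) reading cs[i], cs[i+1]  =  fold over adjacent pairs (Nat-range form)
theorem msa_adjFoldNat {σ : Type} (f : σ → Int × Int → σ) :
    ∀ (cs : List Int) (s : σ),
      (List.range (cs.length - 1)).foldl
        (fun s k => f s (cs.getD k 0, cs.getD (k + 1) 0)) s
      = (cs.zip cs.tail).foldl f s := by
  intro cs
  induction cs with
  | nil => intro s; simp
  | cons c1 t ih =>
    intro s
    match t with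
    | [] => simp
    | c2 :: t' =>
      have hlen : (c1 :: c2 :: t').length - 1 = (c2 :: t').length - 1 + 1 := by
        simp
      rw [hlen, List.range_succ_eq_map, List.foldl_cons, List.foldl_map]
      simpa using ih (f s (c1, c2))

-- the same with Python's pyRange / pyGetD indexing, as A's port writes it
theorem msa_adjFold {σ : Type} (f : σ → Int × Int → σ) (cs : List Int) (s : σ) :
    (PySem.List.pyRange 0 ((cs.length : Int) - 1) 1).foldl
      (fun s i => f s (PySem.List.pyGetD cs i 0, PySem.List.pyGetD cs (i + 1) 0)) s
    = (cs.zip cs.tail).foldl f s := by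
  rw [PySem.List.pyRange_one, List.foldl_map]
  have hcast : ((cs.length : Int) - 1 - 0).toNat = cs.length - 1 := by omega
  rw [hcast, ← msa_adjFoldNat f cs s]
  refine List.foldl_ext _ _ _ ?_
  intro s' k _hk
  have h1 : (0 : Int) + (k : Int) = ((k : Nat) : Int) := by omega
  have h2 : (k : Int) + 1 = (((k + 1 : Nat)) : Int) := by push_cast; ring
  rw [h1, h2, PySem.List.pyGetD_natCast, PySem.List.pyGetD_natCast]

-- A's accumulated lo/hi zip as a flatMap of emissions
theorem msa_zip_fold :
    ∀ (ps : List (Int × Int)) (lo hi : List Int), lo.length = hi.length →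
      (ps.foldl msaStep (lo, hi)).1.length = (ps.foldl msaStep (lo, hi)).2.length ∧
      (ps.foldl msaStep (lo, hi)).1.zip (ps.foldl msaStep (lo, hi)).2
        = lo.zip hi ++ ps.flatMap msaEmit := by
  intro ps
  induction ps with
  | nil => intro lo hi h; exact ⟨h, by simp⟩
  | cons p ps ih =>
    intro lo hi h
    rw [List.foldl_cons]
    by_cases hc : p.2 - p.1 > 1
    · have hstep : msaStep (lo, hi) p = (lo ++ [p.1, p.1 + 1], hi ++ [p.1, p.2 - 1]) := by
        simp [msaStep, hc]
      rw [hstep]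
      obtain ⟨hl, hz⟩ := ih (lo ++ [p.1, p.1 + 1]) (hi ++ [p.1, p.2 - 1]) (by simp [h])
      refine ⟨hl, ?_⟩
      rw [hz, List.zip_append (by omega)]
      simp [msaEmit, hc]
    · have hstep : msaStep (lo, hi) p = (lo ++ [p.1], hi ++ [p.1]) := by
        simp [msaStep, hc]
      rw [hstep]
      obtain ⟨hl, hz⟩ := ih (lo ++ [p.1]) (hi ++ [p.1]) (by simp [h])
      refine ⟨hl, ?_⟩
      rw [hz, List.zip_append (by omega)]
      simp [msaEmit, hc]

-- msaGo as the same flatMap plus the trailing sentinel pairs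
theorem msaGo_eq :
    ∀ (rest : List Int) (c : Int),
      msaGo c rest
        = ((c :: rest).zip rest).flatMap msaEmit
          ++ [((c :: rest).getLast (by simp), (c :: rest).getLast (by simp)),
              ((c :: rest).getLast (by simp) + 1, (c :: rest).getLast (by simp) + 1)] := by
  intro rest
  induction rest with
  | nil => intro c; simp [msaGo]
  | cons n rest' ih =>
    intro c
    rw [msaGo]
    simp only [List.zip_cons_cons, List.flatMap_cons, List.getLast_cons_cons]
    rw [ih n]
    by_cases hc : n - c > 1 <;> simp [msaEmit, hc]

theorem msa_sorted_ne_nil (in_coords : List Int) (h : in_coords ≠ []) :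
    PySem.List.sorted (PySem.Set.ofList in_coords) (fun x => x) false ≠ [] := by
  intro hnil
  rw [PySem.List.sorted_eq_nil_iff] at hnil
  apply h
  cases in_coords with
  | nil => rfl
  | cons x t =>
    exfalso
    have hx : x ∈ PySem.Set.ofList (x :: t) := by
      rw [PySem.Set.mem_ofList]; simp
    rw [hnil] at hx; simp at hx

-- A's port, on a nonempty coordinate list, equals (c-1,c-1) :: msaGo c rest
theorem msa_core_A (c : Int) (rest : List Int) :
    ∀ (cs : List Int), cs = c :: rest →
    (let coords := cs
     let s := (PySem.List.pyRange 0 ((coords.length : Int) - 1) 1).foldl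
        (fun (s : List Int × List Int) index =>
          let lo := s.1 ++ [PySem.List.pyGetD coords index 0]
          let hi := s.2 ++ [PySem.List.pyGetD coords index 0]
          if PySem.List.pyGetD coords (index + 1) 0 - PySem.List.pyGetD coords index 0 > 1 then
            (lo ++ [PySem.List.pyGetD coords index 0 + 1],
             hi ++ [PySem.List.pyGetD coords (index + 1) 0 - 1])
          else (lo, hi))
        ([PySem.List.pyGetD coords 0 0 - 1], [PySem.List.pyGetD coords 0 0 - 1])
     let lo := s.1 ++ [PySem.List.pyGetD coords (-1) 0]
     let hi := s.2 ++ [PySem.List.pyGetD coords (-1) 0]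
     let lo := lo ++ [PySem.List.pyGetD coords (-1) 0 + 1]
     let hi := hi ++ [PySem.List.pyGetD coords (-1) 0 + 1]
     lo.zip hi)
    = (c - 1, c - 1) :: msaGo c rest := by
  intro cs hcs
  subst hcs
  simp only []
  have hne : c :: rest ≠ ([] : List Int) := by simp
  have hget0 : PySem.List.pyGetD (c :: rest) 0 0 = c := PySem.List.pyGetD_zero_cons c rest 0
  have hlast : PySem.List.pyGetD (c :: rest) (-1) 0 = (c :: rest).getLast hne :=
    PySem.List.pyGetD_neg_one (c :: rest) 0 hne
  have hbody : (fun (s : List Int × List Int) index =>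
          let lo := s.1 ++ [PySem.List.pyGetD (c :: rest) index 0]
          let hi := s.2 ++ [PySem.List.pyGetD (c :: rest) index 0]
          if PySem.List.pyGetD (c :: rest) (index + 1) 0 - PySem.List.pyGetD (c :: rest) index 0 > 1 then
            (lo ++ [PySem.List.pyGetD (c :: rest) index 0 + 1],
             hi ++ [PySem.List.pyGetD (c :: rest) (index + 1) 0 - 1])
          else (lo, hi))
      = (fun (s : List Int × List Int) index =>
          msaStep s (PySem.List.pyGetD (c :: rest) index 0,
                     PySem.List.pyGetD (c :: rest) (index + 1) 0)) := by
    funext s index; simp [msaStep]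
  rw [hbody, msa_adjFold msaStep]
  simp only [List.tail_cons]
  rw [hget0, hlast]
  obtain ⟨hl, hz⟩ := msa_zip_fold ((c :: rest).zip rest) [c - 1] [c - 1] rfl
  rw [List.zip_append (by simp [hl]), List.zip_append hl, hz, msaGo_eq rest c]
  simp

-- every first component in msaGo c rest is ≥ c (on a strictly increasing list)
theorem msaGo_lb :
    ∀ (rest : List Int) (c : Int), List.Pairwise (· < ·) (c :: rest) →
      ∀ p ∈ msaGo c rest, c ≤ p.1 := by
  intro rest
  induction rest with
  | nil =>
    intro c _ p hp
    simp [msaGo] at hp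
    rcases hp with h | h <;> simp [h]
  | cons n rest' ih =>
    intro c hpw p hp
    have hcn : c < n := (List.pairwise_cons.mp hpw).1 n (by simp)
    have htail : List.Pairwise (· < ·) (n :: rest') := (List.pairwise_cons.mp hpw).2
    rw [msaGo, List.mem_append] at hp
    rcases hp with h | h
    · have h1 : p.1 = c ∨ p.1 = c + 1 := by
        by_cases hc : n - c > 1
        · rw [if_pos hc] at h
          simp at h
          rcases h with h | h <;> simp [h]
        · rw [if_neg hc] at h
          simp at h
          simp [h]
      omega
    · have := ih n htail p h; omega

-- msaGo's first components are strictly increasing (on a strictly increasing list)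
theorem msaGo_pairwise :
    ∀ (rest : List Int) (c : Int), List.Pairwise (· < ·) (c :: rest) →
      (msaGo c rest).Pairwise (fun p q => p.1 < q.1) := by
  intro rest
  induction rest with
  | nil => intro c _; simp [msaGo]
  | cons n rest' ih =>
    intro c hpw
    have hcn : c < n := (List.pairwise_cons.mp hpw).1 n (by simp)
    have htail : List.Pairwise (· < ·) (n :: rest') := (List.pairwise_cons.mp hpw).2
    have hlb := msaGo_lb rest' n htail
    have hih := ih n htail
    rw [msaGo]
    by_cases hc : n - c > 1
    · rw [if_pos hc]
      refine List.pairwise_append.mpr ⟨?_, hih, ?_⟩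
      · simp
      · intro p hp q hq
        have := hlb q hq
        simp at hp
        rcases hp with h | h <;> simp [h] <;> omega
    · rw [if_neg hc]
      refine List.pairwise_append.mpr ⟨by simp, hih, ?_⟩
      intro p hp q hq
      have := hlb q hq
      simp at hp
      simp [hp]; omega

-- proof-side abbreviations for the three comprehension pieces of B
def msaSingles (cs : List Int) : List (Int × Int) := cs.map (fun x => (x, x))
def msaGaps (cs tl : List Int) : List (Int × Int) :=
  ((cs.zip tl).filter (fun p => p.2 - p.1 > 1)).map (fun p => (p.1 + 1, p.2 - 1))

-- msaGo is a permutation of singles ++ gaps ++ [trailing sentinel]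
theorem msaGo_perm :
    ∀ (rest : List Int) (c : Int),
      (msaGo c rest).Perm
        (msaSingles (c :: rest) ++ msaGaps (c :: rest) rest
          ++ [((c :: rest).getLast (by simp) + 1, (c :: rest).getLast (by simp) + 1)]) := by
  intro rest
  induction rest with
  | nil => intro c; simp [msaGo, msaSingles, msaGaps]
  | cons n rest' ih =>
    intro c
    have hS : msaSingles (c :: n :: rest') = (c, c) :: msaSingles (n :: rest') := by
      simp [msaSingles]
    have hL : (c :: n :: rest').getLast (by simp) = (n :: rest').getLast (by simp) := by
      simp
    rw [msaGo]
    by_cases hc : n - c > 1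
    · have hG : msaGaps (c :: n :: rest') (n :: rest')
          = (c + 1, n - 1) :: msaGaps (n :: rest') rest' := by
        simp [msaGaps, hc]
      rw [if_pos hc, hS, hG, hL]
      refine ((ih n).append_left [(c, c), (c + 1, n - 1)]).trans ?_
      rw [← Multiset.coe_eq_coe]
      simp only [List.cons_append, List.nil_append, ← Multiset.cons_coe,
        ← Multiset.coe_add, ← Multiset.singleton_add]
      abel
    · have hG : msaGaps (c :: n :: rest') (n :: rest') = msaGaps (n :: rest') rest' := by
        have hnc : ¬ (1 < n - c) := by omega
        simp [msaGaps, hnc]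
      rw [if_neg hc, hS, hG, hL]
      simpa using (ih n).cons ((c, c))

-- B's port, on a nonempty strictly increasing coordinate list, equals (c-1,c-1) :: msaGo c rest
theorem msa_core_B (c : Int) (rest : List Int)
    (hpw : List.Pairwise (· < ·) (c :: rest)) :
    ∀ (cs : List Int), cs = c :: rest →
    (let cs := cs
     let pieces := cs.map (fun c => (c, c))
     let pieces := pieces ++
       (((cs.zip (PySem.List.slice cs (some 1) none)).filter
           (fun p => p.2 - p.1 > 1)).map (fun p => (p.1 + 1, p.2 - 1)))
     let pieces := pieces ++
       [(PySem.List.pyGetD cs 0 0 - 1, PySem.List.pyGetD cs 0 0 - 1),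
        (PySem.List.pyGetD cs (-1) 0 + 1, PySem.List.pyGetD cs (-1) 0 + 1)]
     PySem.List.sorted pieces (fun p => p.1) false)
    = (c - 1, c - 1) :: msaGo c rest := by
  intro cs hcs
  subst hcs
  simp only []
  have hne : c :: rest ≠ ([] : List Int) := by simp
  have hget0 : PySem.List.pyGetD (c :: rest) 0 0 = c := PySem.List.pyGetD_zero_cons c rest 0
  have hlast : PySem.List.pyGetD (c :: rest) (-1) 0 = (c :: rest).getLast hne :=
    PySem.List.pyGetD_neg_one (c :: rest) 0 hne
  have hslice : PySem.List.slice (c :: rest) (some 1) none = rest := by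
    simpa using PySem.List.slice_from_one (c :: rest)
  rw [hget0, hlast, hslice]
  apply PySem.List.sorted_eq_of_perm_of_pairwise_lt
  · -- permutation with the concatenated pieces
    refine ((msaGo_perm rest c).cons ((c - 1, c - 1))).trans ?_
    rw [← Multiset.coe_eq_coe]
    simp only [msaSingles, msaGaps,
      ← Multiset.cons_coe, ← Multiset.coe_add, ← Multiset.singleton_add]
    abel
  · -- strictly increasing starts
    refine List.pairwise_cons.mpr ⟨?_, msaGo_pairwise rest c hpw⟩
    intro q hq
    have := msaGo_lb rest c hpw q hq
    omega

-- ===== VERDICT (by name: the statement is the Claim_ definition above) =====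
theorem make_sparce_axis_spec : Claim_equal_make_sparce_axis := by
  intro in_coords _hdom hpre
  unfold Spec_make_sparce_axis make_sparce_axis make_sparce_axis_alt
  have hne := msa_sorted_ne_nil in_coords hpre
  obtain ⟨c, rest, hcs⟩ := List.exists_cons_of_ne_nil hne
  have hpw : List.Pairwise (· < ·) (c :: rest) := by
    rw [← hcs]; exact PySem.List.sorted_ofList_pairwise_lt in_coords
  exact (msa_core_A c rest _ hcs).trans (msa_core_B c rest hpw _ hcs).symm
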